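-- pv_equiv track=rewrite | github.com/pypi-data/pypi-mirror-271 | packages/historydag/historydag-1.3.0.tar.gz/historydag-1.3.0/historydag/compact_genome.py | _iter_adjusted_sites
-- ===== SOURCE A (Python) =====
-- def _iter_adjusted_sites(recorded_sites, removed_sites, site_adjust):
--     """Adjusts recorded_sites if removed_sites are removed.
--
--     For each one, returns a pair (modified site, unmodified site).
--     site_adjust is the amount by which removed_sites base index is
--     smaller than recorded_sites' base index.
--     """
--     all_sites = {site: False for site in recorded_sites}
--     all_sites.update({site + site_adjust: True for site in removed_sites})
--     shift = 0
--     for site, removed in sorted(all_sites.items()):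
--         if removed:
--             shift += 1
--         else:
--             yield site - shift, site
-- ===== SOURCE B (Python) =====
-- def _iter_adjusted_sites(recorded_sites, removed_sites, site_adjust):
--     """Per-site counting re-implementation: for each distinct recorded site
--     (ascending) that does not collide with an adjusted removed site, the shift
--     is the number of distinct adjusted removed sites strictly below it."""
--     removed = {site + site_adjust for site in removed_sites}
--     for site in sorted(set(recorded_sites)):
--         if site not in removed:
--             yield site - sum(1 for r in removed if r < site), site
-- ===== Notes on version B (the rewrite author's own statement) =====
-- stated objective: alternative
-- what changed: Replaces A's merged dict of all sites with a boolean flag and a sorted sweep carrying a running shift accumulator by a per-site computation: for each distinct recorded site (ascending) not colliding with an adjusted removed site, the shift is counted directly as the number of distinct adjusted removed sites strictly below it.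
import Mathlib
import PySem

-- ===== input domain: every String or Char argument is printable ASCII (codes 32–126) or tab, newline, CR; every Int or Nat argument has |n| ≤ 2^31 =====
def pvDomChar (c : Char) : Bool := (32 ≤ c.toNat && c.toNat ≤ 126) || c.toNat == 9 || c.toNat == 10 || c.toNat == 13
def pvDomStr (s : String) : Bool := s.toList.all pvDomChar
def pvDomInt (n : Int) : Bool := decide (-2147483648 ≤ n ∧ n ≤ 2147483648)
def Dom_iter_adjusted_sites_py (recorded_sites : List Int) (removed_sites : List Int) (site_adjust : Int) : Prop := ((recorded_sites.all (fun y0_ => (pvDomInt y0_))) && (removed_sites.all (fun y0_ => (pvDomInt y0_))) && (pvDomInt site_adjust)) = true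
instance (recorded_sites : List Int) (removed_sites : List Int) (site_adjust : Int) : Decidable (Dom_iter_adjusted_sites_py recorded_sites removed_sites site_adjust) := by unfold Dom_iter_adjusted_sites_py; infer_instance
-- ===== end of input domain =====

-- B replaces A's merged-dict sorted sweep with a running shift accumulator by an
-- order-independent per-site count of adjusted removed sites below each recorded site
-- (objective: alternative decomposition; return value only — A is a generator).


-- ===== PORT A =====
-- the 'for site, removed in sorted(all_sites.items())' loop: shift accumulator, yield = cons
def pvSweepA : List (Int × Bool) → Int → List (Int × Int)
  | [], _ => []
  | (site, removed) :: t, shift =>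
    if removed then pvSweepA t (shift + 1)
    else (site - shift, site) :: pvSweepA t shift

def iter_adjusted_sites_py (recorded_sites : List Int) (removed_sites : List Int) (site_adjust : Int) : List (Int × Int) :=
  -- all_sites = {site: False for site in recorded_sites}
  let all_sites : PySem.Dict Int Bool :=
    recorded_sites.foldl (fun d site => d.insert site false) PySem.Dict.empty
  -- all_sites.update({site + site_adjust: True for site in removed_sites}): the comprehension's
  -- duplicate keys collapse by overwrite, so updating with it = inserting each pair in order
  let all_sites :=
    removed_sites.foldl (fun d site => d.insert (site + site_adjust) true) all_sites
  -- sorted(all_sites.items()): dict keys are distinct, so lexicographic tuple sort = sort by key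
  pvSweepA (PySem.List.sorted all_sites.items (fun p => p.1)) 0

-- ===== PORT B =====
-- the 'for site in sorted(set(recorded_sites)): if site not in removed: yield …' loop;
-- sum(1 for r in removed if r < site) iterates the set, but a count is order-independent
def pvLoopB (removed : PySem.Set Int) : List Int → List (Int × Int)
  | [] => []
  | site :: t =>
    if PySem.Set.contains removed site then pvLoopB removed t
    else (site - ((removed.filter (fun r => decide (r < site))).length : Int), site) :: pvLoopB removed t

def iter_adjusted_sites_py_alt (recorded_sites : List Int) (removed_sites : List Int) (site_adjust : Int) : List (Int × Int) :=
  let removed : PySem.Set Int := PySem.Set.ofList (removed_sites.map (fun site => site + site_adjust))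
  pvLoopB removed (PySem.List.sorted (PySem.Set.ofList recorded_sites) (fun x => x))

-- ===== PRECONDITION & SPEC =====
def Spec_iter_adjusted_sites_py (recorded_sites : List Int) (removed_sites : List Int) (site_adjust : Int) (out : List (Int × Int)) : Prop := out = iter_adjusted_sites_py_alt recorded_sites removed_sites site_adjust
instance (recorded_sites : List Int) (removed_sites : List Int) (site_adjust : Int) (out : List (Int × Int)) : Decidable (Spec_iter_adjusted_sites_py recorded_sites removed_sites site_adjust out) := by unfold Spec_iter_adjusted_sites_py; infer_instance

-- ===== CLAIM (what is proved, stated in full; the proofs are below) =====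
def Claim_equal_iter_adjusted_sites_py : Prop := ∀ (recorded_sites : List Int) (removed_sites : List Int) (site_adjust : Int), Dom_iter_adjusted_sites_py recorded_sites removed_sites site_adjust → Spec_iter_adjusted_sites_py recorded_sites removed_sites site_adjust (iter_adjusted_sites_py recorded_sites removed_sites site_adjust)

-- ===== LEMMAS AND PROOFS =====

-- getD through a fold of constant-valued inserts
theorem pv_getD_fold_const {β : Type} (key : β → Int) (v : Bool) :
    ∀ (l : List β) (d : PySem.Dict Int Bool) (k : Int),
      (l.foldl (fun d x => d.insert (key x) v) d).getD k false
        = if k ∈ l.map key then v else d.getD k false := by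
  intro l
  induction l with
  | nil => intro d k; simp
  | cons x t ih =>
    intro d k
    simp only [List.foldl_cons, List.map_cons, List.mem_cons]
    rw [ih]
    by_cases hk : k ∈ t.map key
    · simp [hk]
    · by_cases hx : k = key x
      · simp [hx]
      · simp [hk, hx, PySem.Dict.getD_insert]

-- the sweep over a strictly increasing key list tagged with membership in A
theorem pv_sweep_eq_filterMap (A : List Int) :
    ∀ (K : List Int), K.Pairwise (· < ·) → ∀ (s : Int),
      pvSweepA (K.map (fun k => (k, decide (k ∈ A)))) s
        = K.filterMap (fun k => if k ∈ A then none
            else some (k - (s + ((K.filter (fun j => decide (j ∈ A) && decide (j < k))).length : Int)), k)) := by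
  intro K
  induction K with
  | nil => intro _ s; simp [pvSweepA]
  | cons k0 t ih =>
    intro hp s
    have hlt : ∀ j ∈ t, k0 < j := (List.pairwise_cons.mp hp).1
    have hpt : t.Pairwise (· < ·) := (List.pairwise_cons.mp hp).2
    by_cases h0 : k0 ∈ A
    · have hstep : pvSweepA ((k0 :: t).map (fun k => (k, decide (k ∈ A)))) s
          = pvSweepA (t.map (fun k => (k, decide (k ∈ A)))) (s + 1) := by
        simp [pvSweepA, h0]
      rw [hstep, ih hpt (s + 1), List.filterMap_cons]
      simp only [h0, if_pos]
      apply List.filterMap_congr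
      intro k hk
      by_cases hkA : k ∈ A
      · simp [hkA]
      · have hk0k : k0 < k := hlt k hk
        have hflt : List.filter (fun j => decide (j ∈ A) && decide (j < k)) (k0 :: t)
            = k0 :: List.filter (fun j => decide (j ∈ A) && decide (j < k)) t := by
          simp [h0, hk0k]
        simp only [hkA, if_neg, not_false_iff, hflt, List.length_cons]
        congr 2
        push_cast
        ring
    · have hcnt : List.filter (fun j => decide (j ∈ A) && decide (j < k0)) (k0 :: t) = [] := by
        rw [List.filter_eq_nil_iff]
        intro j hj
        simp only [Bool.and_eq_true, decide_eq_true_eq, not_and]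
        intro hjA
        rcases List.mem_cons.mp hj with rfl | hjt
        · omega
        · have := hlt j hjt; omega
      have hstep : pvSweepA ((k0 :: t).map (fun k => (k, decide (k ∈ A)))) s
          = (k0 - s, k0) :: pvSweepA (t.map (fun k => (k, decide (k ∈ A)))) s := by
        simp [pvSweepA, h0]
      rw [hstep, ih hpt s, List.filterMap_cons]
      simp only [h0, if_neg, not_false_iff, hcnt, List.length_nil]
      have hhead : k0 - (s + ((0 : Nat) : Int)) = k0 - s := by push_cast; ring
      rw [hhead]
      congr 1
      apply List.filterMap_congr
      intro k hk
      by_cases hkA : k ∈ A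
      · simp [hkA]
      · have hflt : List.filter (fun j => decide (j ∈ A) && decide (j < k)) (k0 :: t)
            = List.filter (fun j => decide (j ∈ A) && decide (j < k)) t := by
          simp [h0]
        simp [hkA, hflt]

-- B's loop as a filterMap
theorem pv_loopB_eq_filterMap (R : PySem.Set Int) :
    ∀ (L : List Int),
      pvLoopB R L = L.filterMap (fun site => if PySem.Set.contains R site then none
        else some (site - ((R.filter (fun r => decide (r < site))).length : Int), site)) := by
  intro L
  induction L with
  | nil => simp [pvLoopB]
  | cons x t ih =>
    by_cases hx : x ∈ R
    · have hc : PySem.Set.contains R x = true := by simp [PySem.Set.contains, hx]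
      simp [pvLoopB, hc, hx, ih]
    · have hc : ¬ PySem.Set.contains R x = true := by simp [PySem.Set.contains, hx]
      simp [pvLoopB, hc, hx, ih]

-- a guarded filterMap is a filter followed by a map
theorem pv_filterMap_split (P : Int → Prop) [DecidablePred P] (g : Int → Int) (L : List Int) :
    L.filterMap (fun k => if P k then none else some (g k, k))
      = (L.filter (fun k => decide (¬ P k))).map (fun k => (g k, k)) := by
  induction L with
  | nil => simp
  | cons x t ih =>
    by_cases hx : P x
    · simp [hx, ih]
    · simp [hx, ih]

-- two strictly increasing integer lists with the same members are equal
theorem pv_eq_of_pairwise_lt_of_mem_iff (xs ys : List Int)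
    (hx : xs.Pairwise (· < ·)) (hy : ys.Pairwise (· < ·))
    (hmem : ∀ a, a ∈ xs ↔ a ∈ ys) : xs = ys := by
  have hnx : xs.Nodup := hx.imp (fun h => by omega)
  have hny : ys.Nodup := hy.imp (fun h => by omega)
  have hperm : xs.Perm ys := (List.perm_ext_iff_of_nodup hnx hny).mpr hmem
  have h1 : PySem.List.sorted xs (fun x => x) = xs :=
    PySem.List.sorted_eq_of_perm_of_pairwise_lt xs xs (fun x => x) (List.Perm.refl xs) hx
  have h2 : PySem.List.sorted ys (fun x => x) = ys :=
    PySem.List.sorted_eq_of_perm_of_pairwise_lt ys ys (fun x => x) (List.Perm.refl ys) hy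
  rw [← h1, ← h2]
  exact (PySem.List.sorted_id_eq_sorted_id_iff_perm xs ys).mpr hperm

theorem iter_adjusted_sites_py_eq (recorded_sites removed_sites : List Int) (site_adjust : Int) :
    iter_adjusted_sites_py recorded_sites removed_sites site_adjust
      = iter_adjusted_sites_py_alt recorded_sites removed_sites site_adjust := by
  set adjR : List Int := removed_sites.map (fun site => site + site_adjust) with hadjR
  set R : PySem.Set Int := PySem.Set.ofList adjR with hR
  set d1 : PySem.Dict Int Bool :=
    recorded_sites.foldl (fun d site => d.insert site false) PySem.Dict.empty with hd1
  set d2 : PySem.Dict Int Bool :=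
    removed_sites.foldl (fun d site => d.insert (site + site_adjust) true) d1 with hd2
  -- keys of d2
  have hkeys1 : d1.keys = PySem.Set.update (PySem.Dict.empty : PySem.Dict Int Bool).keys recorded_sites :=
    PySem.Dict.keys_foldl_insert recorded_sites (fun _ _ => false) PySem.Dict.empty
  have hkeys2 : d2.keys = PySem.Set.update d1.keys adjR := by
    rw [hd2, hadjR]
    exact PySem.Dict.keys_foldl_insert_key removed_sites (fun site => site + site_adjust)
      (fun _ _ => true) d1
  have hnd1 : d1.keys.Nodup :=
    PySem.Dict.nodup_keys_foldl_insert recorded_sites (fun _ _ => false) PySem.Dict.empty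
      (by rw [PySem.Dict.keys_empty]; exact List.nodup_nil)
  have hnd2 : d2.keys.Nodup :=
    PySem.Dict.nodup_keys_foldl_insert_key removed_sites (fun site => site + site_adjust)
      (fun _ _ => true) d1 hnd1
  have hmemK : ∀ a, a ∈ d2.keys ↔ a ∈ recorded_sites ∨ a ∈ adjR := by
    intro a
    rw [hkeys2, PySem.Set.mem_update, hkeys1, PySem.Set.mem_update, PySem.Dict.keys_empty]
    simp
  -- lookup of d2
  have hval : ∀ k, d2.getD k false = decide (k ∈ adjR) := by
    intro k
    rw [hd2]
    have h2 := pv_getD_fold_const (fun site => site + site_adjust) true removed_sites d1 k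
    rw [h2]
    have h1 := pv_getD_fold_const (fun site : Int => site) false recorded_sites PySem.Dict.empty k
    simp only [List.map_id'] at h1
    rw [hadjR]
    by_cases hk : k ∈ removed_sites.map (fun site => site + site_adjust)
    · simp [hk]
    · rw [if_neg hk, hd1, h1]
      by_cases hkr : k ∈ recorded_sites <;> simp [hk, hkr, PySem.Dict.getD_empty]
  -- items = keys tagged with membership in adjR
  have hitems : d2.items = d2.keys.map (fun k => (k, decide (k ∈ adjR))) := by
    rw [PySem.Dict.items_eq_map_keys d2 hnd2 false]
    apply List.map_congr_left
    intro k _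
    rw [hval k]
  -- KS: sorted distinct keys
  set KS : List Int := PySem.List.sorted d2.keys (fun x => x) with hKS
  have hKSperm : KS.Perm d2.keys := PySem.List.sorted_perm d2.keys (fun x => x) false
  have hKSnd : KS.Nodup := hKSperm.nodup_iff.mpr hnd2
  have hKSle : KS.Pairwise (· ≤ ·) := PySem.List.sorted_pairwise d2.keys (fun x => x)
  have hKSlt : KS.Pairwise (· < ·) := by
    have hne : KS.Pairwise (· ≠ ·) := hKSnd
    exact (List.Pairwise.and hKSle hne).imp (fun h => lt_of_le_of_ne h.1 h.2)
  have hKSmem : ∀ a, a ∈ KS ↔ a ∈ recorded_sites ∨ a ∈ adjR := by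
    intro a; rw [hKS, PySem.List.mem_sorted]; exact hmemK a
  -- sorted items = KS tagged
  have hsorteditems :
      PySem.List.sorted d2.items (fun p => p.1)
        = KS.map (fun k => (k, decide (k ∈ adjR))) := by
    apply PySem.List.sorted_eq_of_perm_of_pairwise_lt
    · rw [hitems]
      exact hKSperm.map _
    · exact List.Pairwise.map _ (fun a b h => h) hKSlt
  -- recS: sorted distinct recorded sites
  set recS : List Int := PySem.List.sorted (PySem.Set.ofList recorded_sites) (fun x => x) with hrecS
  have hrecSlt : recS.Pairwise (· < ·) := PySem.List.sorted_ofList_pairwise_lt recorded_sites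
  have hrecSmem : ∀ a, a ∈ recS ↔ a ∈ recorded_sites := by
    intro a
    rw [hrecS, PySem.List.mem_sorted, PySem.Set.mem_ofList]
  have hRmem : ∀ a, a ∈ R ↔ a ∈ adjR := fun a => PySem.Set.mem_ofList adjR a
  have hRnd : List.Nodup R := PySem.Set.nodup_ofList adjR
  -- unfold both sides
  show pvSweepA (PySem.List.sorted d2.items (fun p => p.1)) 0 = pvLoopB R recS
  rw [hsorteditems, pv_sweep_eq_filterMap adjR KS hKSlt 0, pv_loopB_eq_filterMap R recS,
    pv_filterMap_split (fun k => k ∈ adjR), pv_filterMap_split (fun site => PySem.Set.contains R site = true)]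
  -- the kept sites coincide
  have hfilters : KS.filter (fun k => decide (¬ k ∈ adjR))
      = recS.filter (fun site => decide (¬ PySem.Set.contains R site = true)) := by
    have hsame : recS.filter (fun site => decide (¬ PySem.Set.contains R site = true))
        = recS.filter (fun k => decide (¬ k ∈ adjR)) := by
      apply List.filter_congr
      intro k _
      simp [PySem.Set.contains, hRmem k]
    rw [hsame]
    apply pv_eq_of_pairwise_lt_of_mem_iff
    · exact List.Pairwise.filter _ hKSlt
    · exact List.Pairwise.filter _ hrecSlt
    · intro a
      simp only [List.mem_filter, hKSmem a, hrecSmem a, decide_eq_true_eq]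
      constructor
      · rintro ⟨hor, hna⟩
        rcases hor with h | h
        · exact ⟨h, hna⟩
        · exact absurd h (by simpa using hna)
      · rintro ⟨hrec, hna⟩
        exact ⟨Or.inl hrec, hna⟩
  rw [hfilters]
  -- the shifts coincide on every kept site
  apply List.map_congr_left
  intro k _
  have hcnt : (KS.filter (fun j => decide (j ∈ adjR) && decide (j < k))).length
      = (List.filter (fun r => decide (r < k)) R).length := by
    apply List.Perm.length_eq
    apply (List.perm_ext_iff_of_nodup (List.Nodup.filter _ hKSnd) (List.Nodup.filter _ hRnd)).mpr
    intro a
    simp only [List.mem_filter, Bool.and_eq_true, decide_eq_true_eq, hKSmem a, hRmem a]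
    constructor
    · rintro ⟨_, ha, hlt⟩
      exact ⟨ha, hlt⟩
    · rintro ⟨ha, hlt⟩
      exact ⟨Or.inr ha, ha, hlt⟩
  rw [hcnt]
  norm_num

-- ===== VERDICT (by name: the statement is the Claim_ definition above) =====
theorem iter_adjusted_sites_py_spec : Claim_equal_iter_adjusted_sites_py := by
  intro recorded_sites removed_sites site_adjust _
  exact iter_adjusted_sites_py_eq recorded_sites removed_sites site_adjust
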